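-- pv_equiv track=rewrite | github.com/Agnello17/othello-game-agents | client_minimax.py | play_move
-- ===== SOURCE A (Python) =====
-- import copy
--
-- NUM_ROWS = 8
--
-- NUM_COLUMNS = 8
--
-- DIRECTIONS = [(-1, -1), (-1, 0), (-1, 1), (0, -1), (0, 1), (1, -1), (1, 0), (1, 1)]
--
-- def play_move(cur_player, board, move):
--
--     # copies board and makes move getting possible capture directions
--     new_board = copy.deepcopy(board)
--     cur_opponent = cur_player + (cur_player % 2) * 2 - 1  # converts 1 -> 2 and 2 -> 1
--     new_board[move[0]][move[1]] = cur_player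
--     _, capture_dirs = get_capture_details(cur_player, new_board, move[0], move[1])
--
--     # makes any possible captures based on move
--     for row_delta, column_delta in capture_dirs:
--         flip_row = move[0] + row_delta
--         flip_col = move[1] + column_delta
--
--         while new_board[flip_row][flip_col] == cur_opponent:
--             new_board[flip_row][flip_col] = cur_player
--             flip_row += row_delta
--             flip_col += column_delta
--
--     # returns new board state after move and any possible captures
--     return new_board
--
-- def get_capture_details(cur_player, board, row, column):
--
--     # runs through each possible direction ensuring a capture run is possible
--     capture = False
--     capture_dirs = []
--     cur_opponent = cur_player + (cur_player % 2) * 2 - 1    # converts 1 -> 2 and 2 -> 1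
--     for row_delta, column_delta in DIRECTIONS:
--
--         # checks if off board
--         if not on_grid(row, column, row_delta, column_delta):
--             continue
--
--         # checks for opponent piece
--         if board[row + row_delta][column + column_delta] == cur_opponent:
--
--             # check line to ensure friendly piece on other side
--             friendly_found = False
--             cur_row = row + row_delta
--             cur_column = column + column_delta
--             while not friendly_found:
--
--                 # checks if friendly piece found yet
--                 if board[cur_row][cur_column] == cur_player:
--                     friendly_found = True
--
--                 # if not friendly, ensures there is still a run of opponent pieces
--                 elif board[cur_row][cur_column] != cur_opponent:
--                     break
--
--                 # checks if next square off board
--                 if not on_grid(cur_row, cur_column, row_delta, column_delta):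
--                     break
--                 else:
--                     # updates checking position
--                     cur_row += row_delta
--                     cur_column += column_delta
--
--             # updates capture state and adds capture direction
--             if friendly_found:
--                 capture = True
--                 capture_dirs.append((row_delta, column_delta))
--
--     # returns if can capture and capture directions
--     return capture, capture_dirs
--
-- def on_grid(row, column, row_delta, column_delta):
--     if (row + row_delta < 0) or (row + row_delta >= NUM_ROWS):
--         return False
--     elif (column + column_delta < 0) or (column + column_delta >= NUM_COLUMNS):
--         return False
--     else:
--         return True
-- ===== SOURCE B (Python) =====
-- NUM_ROWS = 8
--
-- NUM_COLUMNS = 8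
--
-- DIRECTIONS = [(-1, -1), (-1, 0), (-1, 1), (0, -1), (0, 1), (1, -1), (1, 0), (1, 1)]
--
-- def play_move(cur_player, board, move):
--     # one buffered pass per direction: walk outward collecting opponent
--     # coordinates and flip the buffer as soon as a friendly piece closes it
--     # (no validate-then-rescan helper, each run is walked once).
--     new_board = [row[:] for row in board]
--     cur_opponent = cur_player + (cur_player % 2) * 2 - 1
--     new_board[move[0]][move[1]] = cur_player
--     for row_delta, column_delta in DIRECTIONS:
--         run = []
--         r, c = move[0] + row_delta, move[1] + column_delta
--         while 0 <= r < NUM_ROWS and 0 <= c < NUM_COLUMNS and new_board[r][c] == cur_opponent: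
--             run.append((r, c))
--             r += row_delta
--             c += column_delta
--         if run and 0 <= r < NUM_ROWS and 0 <= c < NUM_COLUMNS and new_board[r][c] == cur_player:
--             for flip_row, flip_col in run:
--                 new_board[flip_row][flip_col] = cur_player
--     return new_board
-- ===== Notes on version B (the rewrite author's own statement) =====
-- stated objective: simpler
-- what changed: B replaces A's two-phase validate-then-reflip (helper that walks each direction to collect capture directions, then a second mutating walk per returned direction) with a single pass that walks each direction once, buffering the opponent coordinates, and flips the buffer only when a friendly piece closes the run.
import Mathlib
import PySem

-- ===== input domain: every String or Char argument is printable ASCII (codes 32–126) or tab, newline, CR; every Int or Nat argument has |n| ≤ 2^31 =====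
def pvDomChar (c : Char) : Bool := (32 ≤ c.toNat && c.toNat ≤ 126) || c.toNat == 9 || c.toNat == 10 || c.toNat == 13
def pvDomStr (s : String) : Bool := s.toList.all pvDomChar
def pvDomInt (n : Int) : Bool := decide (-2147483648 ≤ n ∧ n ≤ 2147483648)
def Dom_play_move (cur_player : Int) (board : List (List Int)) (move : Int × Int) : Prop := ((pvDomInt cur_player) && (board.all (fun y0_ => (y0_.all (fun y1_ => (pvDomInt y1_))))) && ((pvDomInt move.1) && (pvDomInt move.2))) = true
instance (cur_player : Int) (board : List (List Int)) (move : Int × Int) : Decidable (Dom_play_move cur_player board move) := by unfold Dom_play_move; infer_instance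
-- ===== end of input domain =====

-- B replaces A's validate-then-rescan two-phase move application (helper returning
-- capture directions, then a second walk that re-flips each direction) by one
-- buffered walk per direction on the copied board (objective: simpler).

-- ===== PORT A =====
def pvDIRECTIONS : List (Int × Int) := [(-1,-1),(-1,0),(-1,1),(0,-1),(0,1),(1,-1),(1,0),(1,1)]

-- board[r][c] as an Int: exact wherever the Python reads it (Pre_ guarantees the
-- cell exists; PySem.List.pyGetD is Python-exact incl. negative indices)
def pvCell (b : List (List Int)) (r c : Int) : Int :=
  PySem.List.pyGetD (PySem.List.pyGetD b r []) c 0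

-- board[r][c] = v: exact wherever the Python writes (Pre_ guarantees in range;
-- PySem.List.pySetD is Python-exact incl. negative indices)
def pvSet (b : List (List Int)) (r c v : Int) : List (List Int) :=
  PySem.List.pySetD b r (PySem.List.pySetD (PySem.List.pyGetD b r []) c v)

def on_grid (row column row_delta column_delta : Int) : Bool :=
  if row + row_delta < 0 ∨ row + row_delta ≥ 8 then false
  else if column + column_delta < 0 ∨ column + column_delta ≥ 8 then false
  else true

-- the inner 'while not friendly_found' walk of get_capture_details
-- (fuel 16 > 8: the loop leaves the 8x8 grid in < 9 steps)
def pvWalkA (b : List (List Int)) (p opp rd cd : Int) : Nat → Int → Int → Bool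
  | 0, _, _ => false
  | f+1, r, c =>
    if pvCell b r c = p then true
    else if pvCell b r c ≠ opp then false
    else if ¬ on_grid r c rd cd then false
    else pvWalkA b p opp rd cd f (r+rd) (c+cd)

def get_capture_details (cur_player : Int) (board : List (List Int)) (row column : Int) :
    Bool × List (Int × Int) :=
  let cur_opponent := cur_player + (PySem.Int.mod cur_player 2) * 2 - 1
  pvDIRECTIONS.foldl (fun acc d =>
    if ¬ on_grid row column d.1 d.2 then acc
    else if pvCell board (row + d.1) (column + d.2) = cur_opponent then
      (if pvWalkA board cur_player cur_opponent d.1 d.2 16 (row + d.1) (column + d.2) then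
        (true, acc.2 ++ [d])
      else acc)
    else acc) (false, [])

-- the 'while new_board[flip_row][flip_col] == cur_opponent' flipping loop
-- (fuel 16: on admitted inputs the closing friendly piece stops it in < 9 steps)
def pvFlipA (p opp rd cd : Int) : Nat → List (List Int) → Int → Int → List (List Int)
  | 0, b, _, _ => b
  | f+1, b, r, c =>
    if pvCell b r c = opp then pvFlipA p opp rd cd f (pvSet b r c p) (r+rd) (c+cd)
    else b

def play_move (cur_player : Int) (board : List (List Int)) (move : Int × Int) : List (List Int) :=
  let new_board := pvSet board move.1 move.2 cur_player
  let cur_opponent := cur_player + (PySem.Int.mod cur_player 2) * 2 - 1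
  let capture_dirs := (get_capture_details cur_player new_board move.1 move.2).2
  capture_dirs.foldl
    (fun b d => pvFlipA cur_player cur_opponent d.1 d.2 16 b (move.1 + d.1) (move.2 + d.2))
    new_board

-- ===== PORT B =====
-- the buffering walk: collect consecutive opponent cells, return (run, stop coords)
-- (fuel 16 > 8: the walk leaves the 8x8 grid in < 9 steps)
def pvRunB (b : List (List Int)) (opp rd cd : Int) :
    Nat → List (Int × Int) → Int → Int → List (Int × Int) × Int × Int
  | 0, run, r, c => (run, r, c)
  | f+1, run, r, c =>
    if 0 ≤ r ∧ r < 8 ∧ 0 ≤ c ∧ c < 8 ∧ pvCell b r c = opp then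
      pvRunB b opp rd cd f (run ++ [(r,c)]) (r+rd) (c+cd)
    else (run, r, c)

-- Python B copies the board row by row before writing; values are ints, so the
-- copy is the board itself here.
def play_move_alt (cur_player : Int) (board : List (List Int)) (move : Int × Int) : List (List Int) :=
  let new_board := pvSet board move.1 move.2 cur_player
  let cur_opponent := cur_player + (PySem.Int.mod cur_player 2) * 2 - 1
  pvDIRECTIONS.foldl (fun b d =>
    let t := pvRunB b cur_opponent d.1 d.2 16 [] (move.1 + d.1) (move.2 + d.2)
    if t.1 ≠ [] ∧ 0 ≤ t.2.1 ∧ t.2.1 < 8 ∧ 0 ≤ t.2.2 ∧ t.2.2 < 8 ∧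
        pvCell b t.2.1 t.2.2 = cur_player then
      t.1.foldl (fun bb q => pvSet bb q.1 q.2 cur_player) b
    else b) new_board

-- ===== PRECONDITION & SPEC =====
def pvO (p : Int) : Int := p + (PySem.Int.mod p 2) * 2 - 1

def pvInb (r c : Int) : Prop := 0 ≤ r ∧ r < 8 ∧ 0 ≤ c ∧ c < 8

def pvValid (b : List (List Int)) (r c : Int) : Prop :=
  0 ≤ r ∧ 0 ≤ c ∧ r < (b.length : Int) ∧ c < ((b.getD r.toNat []).length : Int)

-- Exactly the inputs on which the Python A returns normally: the move indexes an
-- existing cell (negative indices count from the end, as in Python), and the scan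
-- never runs off the stored rows: whenever a straight chain of opponent pieces
-- inside the 8x8 playing area leads from the move square to a further in-area
-- square, that square exists on the board (after the move piece is placed).
def Pre_play_move (cur_player : Int) (board : List (List Int)) (move : Int × Int) : Prop :=
  PySem.Raise.InRange board.length move.1 ∧
  PySem.Raise.InRange (PySem.List.pyGetD board move.1 []).length move.2 ∧
  (∀ d ∈ pvDIRECTIONS, ∀ k ∈ List.range 9, 1 ≤ k →
    pvInb (move.1 + (k:Int)*d.1) (move.2 + (k:Int)*d.2) →
    (∀ j ∈ List.range k, 1 ≤ j →
      pvInb (move.1 + (j:Int)*d.1) (move.2 + (j:Int)*d.2) ∧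
      pvCell (pvSet board move.1 move.2 cur_player) (move.1 + (j:Int)*d.1) (move.2 + (j:Int)*d.2)
        = pvO cur_player) →
    pvValid (pvSet board move.1 move.2 cur_player) (move.1 + (k:Int)*d.1) (move.2 + (k:Int)*d.2))
instance (cur_player : Int) (board : List (List Int)) (move : Int × Int) : Decidable (Pre_play_move cur_player board move) := by unfold Pre_play_move pvInb pvValid; infer_instance

def pvWitness_play_move : Int × List (List Int) × (Int × Int) :=
  (1, [[0,0,0],[0,2,0],[0,0,1]], (0, 0))

def Spec_play_move (cur_player : Int) (board : List (List Int)) (move : Int × Int) (out : List (List Int)) : Prop := out = play_move_alt cur_player board move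
instance (cur_player : Int) (board : List (List Int)) (move : Int × Int) (out : List (List Int)) : Decidable (Spec_play_move cur_player board move out) := by unfold Spec_play_move; infer_instance

-- ===== CLAIM (what is proved, stated in full; the proofs are below) =====
def Claim_equal_play_move : Prop := ∀ (cur_player : Int) (board : List (List Int)) (move : Int × Int), Dom_play_move cur_player board move → Pre_play_move cur_player board move → Spec_play_move cur_player board move (play_move cur_player board move)

-- ===== LEMMAS AND PROOFS =====
-- ---- basic facts about cells and writes ----
theorem pvO_ne (p : Int) : pvO p ≠ p := by
  have h := PySem.Int.mod_two_eq p
  unfold pvO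
  rcases h with h | h <;> rw [h] <;> omega

theorem pvCell_nonneg (b : List (List Int)) {r c : Int} (hr : 0 ≤ r) (hc : 0 ≤ c) :
    pvCell b r c = (b.getD r.toNat []).getD c.toNat 0 := by
  unfold pvCell
  rw [show r = ((r.toNat : Nat) : Int) by omega, show c = ((c.toNat : Nat) : Int) by omega]
  rw [PySem.List.pyGetD_natCast, PySem.List.pyGetD_natCast]
  simp only [List.getD_eq_getElem?_getD]
  congr 2 <;> omega

theorem pvSet_nonneg (b : List (List Int)) {r c : Int} (v : Int) (hr : 0 ≤ r) (hc : 0 ≤ c) :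
    pvSet b r c v = b.set r.toNat ((b.getD r.toNat []).set c.toNat v) := by
  unfold pvSet
  rw [show r = ((r.toNat : Nat) : Int) by omega, show c = ((c.toNat : Nat) : Int) by omega]
  rw [PySem.List.pyGetD_natCast, PySem.List.pySetD_natCast, PySem.List.pySetD_natCast]
  simp only [List.getD_eq_getElem?_getD]
  congr 2 <;> omega

theorem pvCell_set_ne (b : List (List Int)) (v : Int) {r c r' c' : Int}
    (hr : 0 ≤ r) (hc : 0 ≤ c) (hr' : 0 ≤ r') (hc' : 0 ≤ c') (hne : (r', c') ≠ (r, c)) :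
    pvCell (pvSet b r c v) r' c' = pvCell b r' c' := by
  rw [pvSet_nonneg b v hr hc, pvCell_nonneg _ hr' hc', pvCell_nonneg b hr' hc']
  by_cases hrr : r'.toNat = r.toNat
  · have hcc : c'.toNat ≠ c.toNat := by
      intro hcEq
      exact hne (by rw [Prod.ext_iff]; constructor <;> simp <;> omega)
    rw [hrr]
    rcases Nat.lt_or_ge r.toNat b.length with hlt | hlt
    · rw [List.getD_eq_getElem _ [] (by simpa using hlt), List.getElem_set_self,
          List.getD_eq_getElem b [] hlt]
      rcases Nat.lt_or_ge c'.toNat (b[r.toNat].length) with hcl | hcl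
      · rw [List.getD_eq_getElem _ 0 (by simpa using hcl), List.getElem_set_ne (by omega),
            List.getD_eq_getElem _ 0 hcl]
      · rw [List.getD_eq_default _ 0 (by simpa using hcl), List.getD_eq_default _ 0 hcl]
    · rw [List.set_eq_of_length_le hlt]
  · rcases Nat.lt_or_ge r'.toNat b.length with hrl | hrl
    · rw [List.getD_eq_getElem _ [] (by simpa using hrl), List.getElem_set_ne (by omega),
          List.getD_eq_getElem b [] hrl]
    · rw [List.getD_eq_default _ [] (by simpa using hrl), List.getD_eq_default _ [] hrl]

-- ---- applying a list of flips ----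
def pvSetAll (p : Int) (bb : List (List Int)) (l : List (Int × Int)) : List (List Int) :=
  l.foldl (fun b q => pvSet b q.1 q.2 p) bb

theorem pvSetAll_nil (p : Int) (bb : List (List Int)) : pvSetAll p bb [] = bb := rfl

theorem pvSetAll_cons' (p : Int) (bb : List (List Int)) (r c : Int) (l : List (Int × Int)) :
    pvSetAll p bb ((r, c) :: l) = pvSetAll p (pvSet bb r c p) l := rfl

theorem pvSetAll_append (p : Int) (bb : List (List Int)) (u v : List (Int × Int)) :
    pvSetAll p bb (u ++ v) = pvSetAll p (pvSetAll p bb u) v := List.foldl_append ..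

theorem pvCell_setAll_not_mem (p : Int) : ∀ (l : List (Int × Int)) (bb : List (List Int)) (r c : Int),
    (∀ q ∈ l, 0 ≤ q.1 ∧ 0 ≤ q.2) → 0 ≤ r → 0 ≤ c → (r, c) ∉ l →
    pvCell (pvSetAll p bb l) r c = pvCell bb r c := by
  intro l
  induction l with
  | nil => intro bb r c _ _ _ _; rfl
  | cons q l ih =>
    intro bb r c hq hr hc hnm
    rw [show q = (q.1, q.2) from rfl, pvSetAll_cons',
        ih (pvSet bb q.1 q.2 p) r c (fun q' hq' => hq q' (by simp [hq'])) hr hc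
          (fun h => hnm (by simp [h])),
        pvCell_set_ne bb p (hq q (by simp)).1 (hq q (by simp)).2 hr hc
          (fun h => hnm (by rw [h]; simp))]
-- ---- directions and the walk measure ----
def pvDirOk (rd cd : Int) : Prop :=
  (rd = -1 ∨ rd = 0 ∨ rd = 1) ∧ (cd = -1 ∨ cd = 0 ∨ cd = 1) ∧ ¬(rd = 0 ∧ cd = 0)

theorem pvDir_spec {d : Int × Int} (hd : d ∈ pvDIRECTIONS) : pvDirOk d.1 d.2 := by
  fin_cases hd <;> exact ⟨by simp, by simp, by simp⟩

def pvMu (rd cd r c : Int) : Nat :=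
  if 0 < rd then (8 - r).toNat else if rd < 0 then (r + 1).toNat
  else if 0 < cd then (8 - c).toNat else (c + 1).toNat

theorem pvMu_le (rd cd r c : Int) (h : pvInb r c) : pvMu rd cd r c ≤ 8 := by
  obtain ⟨h1, h2, h3, h4⟩ := h; unfold pvMu; split_ifs <;> omega

theorem pvMu_pos (rd cd r c : Int) (h : pvInb r c) : 1 ≤ pvMu rd cd r c := by
  obtain ⟨h1, h2, h3, h4⟩ := h; unfold pvMu; split_ifs <;> omega

theorem pvMu_step (rd cd r c : Int) (hdir : pvDirOk rd cd) (h : pvInb r c)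
    (h' : pvInb (r + rd) (c + cd)) : pvMu rd cd (r + rd) (c + cd) < pvMu rd cd r c := by
  obtain ⟨ha, hb, hc⟩ := hdir
  obtain ⟨h1, h2, h3, h4⟩ := h
  obtain ⟨h1', h2', h3', h4'⟩ := h'
  unfold pvMu
  rcases ha with rfl | rfl | rfl <;> rcases hb with rfl | rfl | rfl <;> split_ifs <;> omega

theorem pvStep_ne (rd cd r c : Int) (hdir : pvDirOk rd cd) (k : Nat) :
    (r + rd + (k : Int) * rd, c + cd + (k : Int) * cd) ≠ (r, c) := by
  obtain ⟨ha, hb, hc⟩ := hdir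
  intro h
  rw [Prod.ext_iff] at h
  obtain ⟨e1, e2⟩ := h
  rcases ha with rfl | rfl | rfl <;> rcases hb with rfl | rfl | rfl <;> simp_all <;> omega

-- ---- unfolding lemmas for the fueled loops ----
theorem pvRunB_zero (b : List (List Int)) (o rd cd : Int) (run : List (Int × Int)) (r c : Int) :
    pvRunB b o rd cd 0 run r c = (run, r, c) := rfl

theorem pvRunB_succ (b : List (List Int)) (o rd cd : Int) (f : Nat) (run : List (Int × Int)) (r c : Int) :
    pvRunB b o rd cd (f+1) run r c =
      if 0 ≤ r ∧ r < 8 ∧ 0 ≤ c ∧ c < 8 ∧ pvCell b r c = o then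
        pvRunB b o rd cd f (run ++ [(r,c)]) (r+rd) (c+cd)
      else (run, r, c) := rfl

theorem pvWalkA_succ (b : List (List Int)) (p o rd cd : Int) (f : Nat) (r c : Int) :
    pvWalkA b p o rd cd (f+1) r c =
      if pvCell b r c = p then true
      else if pvCell b r c ≠ o then false
      else if ¬ on_grid r c rd cd then false
      else pvWalkA b p o rd cd f (r+rd) (c+cd) := rfl

theorem pvFlipA_succ (p o rd cd : Int) (f : Nat) (b : List (List Int)) (r c : Int) :
    pvFlipA p o rd cd (f+1) b r c =
      if pvCell b r c = o then pvFlipA p o rd cd f (pvSet b r c p) (r+rd) (c+cd)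
      else b := rfl

theorem pvRunB_cond_iff (b : List (List Int)) (o r c : Int) :
    (0 ≤ r ∧ r < 8 ∧ 0 ≤ c ∧ c < 8 ∧ pvCell b r c = o) ↔ (pvInb r c ∧ pvCell b r c = o) := by
  unfold pvInb; tauto

theorem pvRunB_stop (b : List (List Int)) (o rd cd : Int) (f : Nat) (run : List (Int × Int)) (r c : Int)
    (hno : ¬ (pvInb r c ∧ pvCell b r c = o)) : pvRunB b o rd cd f run r c = (run, r, c) := by
  cases f with
  | zero => rfl
  | succ f => rw [pvRunB_succ, if_neg]; rw [pvRunB_cond_iff]; exact hno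

theorem pvOn_grid_iff (r c rd cd : Int) : on_grid r c rd cd = true ↔ pvInb (r + rd) (c + cd) := by
  unfold on_grid pvInb; split_ifs <;> simp <;> omega
-- ---- runB structure lemmas ----
theorem pvRunB_acc (b : List (List Int)) (o rd cd : Int) :
    ∀ (f : Nat) (r c : Int) (run : List (Int × Int)),
    pvRunB b o rd cd f run r c =
      (run ++ (pvRunB b o rd cd f [] r c).1, (pvRunB b o rd cd f [] r c).2) := by
  intro f
  induction f with
  | zero => intro r c run; simp [pvRunB_zero]
  | succ f ih =>
    intro r c run
    rw [pvRunB_succ, pvRunB_succ]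
    split_ifs with hcond
    · rw [ih (r+rd) (c+cd) (run ++ [(r,c)]), ih (r+rd) (c+cd) ([] ++ [(r,c)])]
      simp
    · simp

theorem pvRunB_congr (b1 b2 : List (List Int)) (o rd cd : Int) :
    ∀ (f : Nat) (r c : Int),
    (∀ k : Nat, pvInb (r + k*rd) (c + k*cd) → pvCell b1 (r + k*rd) (c + k*cd) = pvCell b2 (r + k*rd) (c + k*cd)) →
    ∀ run, pvRunB b1 o rd cd f run r c = pvRunB b2 o rd cd f run r c := by
  intro f
  induction f with
  | zero => intro r c _ run; rfl
  | succ f ih =>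
    intro r c hag run
    have h0 : pvInb r c → pvCell b1 r c = pvCell b2 r c := by
      intro hin; have := hag 0 (by simpa using hin); simpa using this
    rw [pvRunB_succ, pvRunB_succ]
    by_cases hin : pvInb r c
    · rw [h0 hin]
      split_ifs with hcond
      · refine ih (r+rd) (c+cd) (fun k hk => ?_) _
        have er : r + rd + (k:Int)*rd = r + (((k+1 : Nat)):Int)*rd := by push_cast; ring
        have ec : c + cd + (k:Int)*cd = c + (((k+1 : Nat)):Int)*cd := by push_cast; ring
        rw [er, ec] at hk ⊢
        exact hag (k+1) hk
      · rfl
    · have hnc1 : ¬ (0 ≤ r ∧ r < 8 ∧ 0 ≤ c ∧ c < 8 ∧ pvCell b1 r c = o) := by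
        rw [pvRunB_cond_iff]; tauto
      have hnc2 : ¬ (0 ≤ r ∧ r < 8 ∧ 0 ≤ c ∧ c < 8 ∧ pvCell b2 r c = o) := by
        rw [pvRunB_cond_iff]; tauto
      rw [if_neg hnc1, if_neg hnc2]

theorem pvRunB_mem (b : List (List Int)) (o rd cd : Int) :
    ∀ (f : Nat) (r c : Int) (q : Int × Int), q ∈ (pvRunB b o rd cd f [] r c).1 →
      pvInb q.1 q.2 ∧ pvCell b q.1 q.2 = o ∧ ∃ k : Nat, q.1 = r + k*rd ∧ q.2 = c + k*cd := by
  intro f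
  induction f with
  | zero => intro r c q hq; simp [pvRunB_zero] at hq
  | succ f ih =>
    intro r c q hq
    rw [pvRunB_succ] at hq
    split_ifs at hq with hcond
    · rw [pvRunB_acc] at hq
      simp only [List.nil_append] at hq
      rcases List.mem_cons.mp hq with rfl | hq'
      · exact ⟨(pvRunB_cond_iff b o r c |>.mp hcond).1, (pvRunB_cond_iff b o r c |>.mp hcond).2,
          0, by simp, by simp⟩
      · obtain ⟨h1, h2, k, hk1, hk2⟩ := ih (r+rd) (c+cd) q hq'
        exact ⟨h1, h2, k+1, by push_cast; rw [hk1]; ring, by push_cast; rw [hk2]; ring⟩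
    · simp at hq

theorem pvRunB_stop_ray (b : List (List Int)) (o rd cd : Int) :
    ∀ (f : Nat) (r c : Int), ∃ k : Nat,
      (pvRunB b o rd cd f [] r c).2.1 = r + k*rd ∧ (pvRunB b o rd cd f [] r c).2.2 = c + k*cd := by
  intro f
  induction f with
  | zero => intro r c; exact ⟨0, by simp [pvRunB_zero], by simp [pvRunB_zero]⟩
  | succ f ih =>
    intro r c
    rw [pvRunB_succ]
    split_ifs with hcond
    · rw [pvRunB_acc]
      obtain ⟨k, hk1, hk2⟩ := ih (r+rd) (c+cd)
      exact ⟨k+1, by push_cast; rw [hk1]; ring, by push_cast; rw [hk2]; ring⟩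
    · exact ⟨0, by simp, by simp⟩

-- ---- A's validation walk computes "the run is closed by a friendly piece" ----
theorem pvWalkA_eq (b : List (List Int)) (p o rd cd : Int) (hop : o ≠ p) (hdir : pvDirOk rd cd) :
    ∀ (f : Nat) (r c : Int), pvInb r c → pvMu rd cd r c ≤ f →
    (pvWalkA b p o rd cd f r c = true ↔
      (pvInb (pvRunB b o rd cd f [] r c).2.1 (pvRunB b o rd cd f [] r c).2.2 ∧
       pvCell b (pvRunB b o rd cd f [] r c).2.1 (pvRunB b o rd cd f [] r c).2.2 = p)) := by
  intro f
  induction f with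
  | zero => intro r c hin hmu; exact absurd hmu (by have := pvMu_pos rd cd r c hin; omega)
  | succ f ih =>
    intro r c hin hmu
    rw [pvWalkA_succ]
    by_cases hp : pvCell b r c = p
    · rw [pvRunB_stop b o rd cd (f+1) [] r c (by rw [hp]; tauto)]
      simp [hp, hin]
    · by_cases ho : pvCell b r c = o
      · rw [if_neg hp, if_neg (by simpa using ho)]
        have hcond : 0 ≤ r ∧ r < 8 ∧ 0 ≤ c ∧ c < 8 ∧ pvCell b r c = o :=
          (pvRunB_cond_iff b o r c).mpr ⟨hin, ho⟩
        rw [pvRunB_succ, if_pos hcond, pvRunB_acc]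
        by_cases hnx : pvInb (r+rd) (c+cd)
        · rw [if_neg (by rw [not_not, pvOn_grid_iff]; exact hnx)]
          have hmu' : pvMu rd cd (r+rd) (c+cd) ≤ f := by
            have := pvMu_step rd cd r c hdir hin hnx; omega
          exact ih (r+rd) (c+cd) hnx hmu'
        · rw [if_pos (by rw [not_iff_not.mpr (pvOn_grid_iff r c rd cd)]; exact hnx)]
          rw [pvRunB_stop b o rd cd f [] (r+rd) (c+cd) (by tauto)]
          simp [hnx]
      · rw [if_neg hp, if_pos (by simpa using ho),
            pvRunB_stop b o rd cd (f+1) [] r c (by tauto)]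
        simp [hp]

-- ---- A's flipping loop applies exactly the buffered run ----
theorem pvFlipA_eq (b : List (List Int)) (p o rd cd : Int) (hop : o ≠ p) (hdir : pvDirOk rd cd) :
    ∀ (f : Nat) (r c : Int) (bb : List (List Int)),
    (∀ k : Nat, pvInb (r + k*rd) (c + k*cd) → pvCell bb (r + k*rd) (c + k*cd) = pvCell b (r + k*rd) (c + k*cd)) →
    pvMu rd cd r c ≤ f →
    pvInb (pvRunB b o rd cd f [] r c).2.1 (pvRunB b o rd cd f [] r c).2.2 →
    pvCell b (pvRunB b o rd cd f [] r c).2.1 (pvRunB b o rd cd f [] r c).2.2 = p →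
    pvFlipA p o rd cd f bb r c = pvSetAll p bb (pvRunB b o rd cd f [] r c).1 := by
  intro f
  induction f with
  | zero =>
    intro r c bb _ hmu hstop _
    rw [pvRunB_zero] at hstop ⊢
    exact absurd hmu (by have := pvMu_pos rd cd r c hstop; omega)
  | succ f ih =>
    intro r c bb hag hmu hstop hp
    have h0 : pvInb r c → pvCell bb r c = pvCell b r c := by
      intro hin; have := hag 0 (by simpa using hin); simpa using this
    by_cases hin : pvInb r c
    · by_cases ho : pvCell b r c = o
      · have hcond : 0 ≤ r ∧ r < 8 ∧ 0 ≤ c ∧ c < 8 ∧ pvCell b r c = o :=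
          (pvRunB_cond_iff b o r c).mpr ⟨hin, ho⟩
        rw [pvRunB_succ, if_pos hcond, pvRunB_acc] at hstop hp ⊢
        have hnx : pvInb (r+rd) (c+cd) := by
          by_contra hnx
          rw [pvRunB_stop b o rd cd f [] (r+rd) (c+cd) (by tauto)] at hstop
          exact hnx hstop
        have hmu' : pvMu rd cd (r+rd) (c+cd) ≤ f := by
          have := pvMu_step rd cd r c hdir hin hnx; omega
        have hag' : ∀ k : Nat, pvInb ((r+rd) + k*rd) ((c+cd) + k*cd) →
            pvCell (pvSet bb r c p) ((r+rd) + k*rd) ((c+cd) + k*cd) = pvCell b ((r+rd) + k*rd) ((c+cd) + k*cd) := by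
          intro k hk
          rw [pvCell_set_ne bb p hin.1 hin.2.2.1 hk.1 hk.2.2.1 (pvStep_ne rd cd r c hdir k)]
          have er : r + rd + (k:Int)*rd = r + (((k+1 : Nat)):Int)*rd := by push_cast; ring
          have ec : c + cd + (k:Int)*cd = c + (((k+1 : Nat)):Int)*cd := by push_cast; ring
          rw [er, ec] at hk ⊢
          exact hag (k+1) hk
        rw [pvFlipA_succ, if_pos (by rw [h0 hin]; exact ho),
            ih (r+rd) (c+cd) (pvSet bb r c p) hag' hmu' hstop hp]
        simp only [List.nil_append, List.singleton_append]
        rw [pvSetAll_cons']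
      · rw [pvRunB_succ, if_neg (by rw [pvRunB_cond_iff]; tauto)]
        rw [pvFlipA_succ, if_neg (by rw [h0 hin]; exact ho)]
        rfl
    · rw [pvRunB_stop b o rd cd (f+1) [] r c (by tauto)] at hstop
      exact absurd hstop hin
-- ---- per-move notions, all read on the placed board ----
def pvRunOf (p : Int) (nb : List (List Int)) (mr mc : Int) (d : Int × Int) :
    List (Int × Int) × Int × Int :=
  pvRunB nb (pvO p) d.1 d.2 16 [] (mr + d.1) (mc + d.2)

def pvBC (p : Int) (nb : List (List Int)) (mr mc : Int) (d : Int × Int) : Prop :=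
  (pvRunOf p nb mr mc d).1 ≠ [] ∧ 0 ≤ (pvRunOf p nb mr mc d).2.1 ∧ (pvRunOf p nb mr mc d).2.1 < 8 ∧
    0 ≤ (pvRunOf p nb mr mc d).2.2 ∧ (pvRunOf p nb mr mc d).2.2 < 8 ∧
    pvCell nb (pvRunOf p nb mr mc d).2.1 (pvRunOf p nb mr mc d).2.2 = p

def pvFlipsOf (p : Int) (nb : List (List Int)) (mr mc : Int) (d : Int × Int) : List (Int × Int) :=
  if (pvRunOf p nb mr mc d).1 ≠ [] ∧ 0 ≤ (pvRunOf p nb mr mc d).2.1 ∧ (pvRunOf p nb mr mc d).2.1 < 8 ∧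
      0 ≤ (pvRunOf p nb mr mc d).2.2 ∧ (pvRunOf p nb mr mc d).2.2 < 8 ∧
      pvCell nb (pvRunOf p nb mr mc d).2.1 (pvRunOf p nb mr mc d).2.2 = p
  then (pvRunOf p nb mr mc d).1 else []

theorem pvFlipsOf_pos {p : Int} {nb : List (List Int)} {mr mc : Int} {d : Int × Int}
    (h : pvBC p nb mr mc d) : pvFlipsOf p nb mr mc d = (pvRunOf p nb mr mc d).1 := if_pos h

theorem pvFlipsOf_neg {p : Int} {nb : List (List Int)} {mr mc : Int} {d : Int × Int}
    (h : ¬ pvBC p nb mr mc d) : pvFlipsOf p nb mr mc d = [] := if_neg h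

-- A's capture_dirs list is the filter of DIRECTIONS by its three-test condition
theorem pv_gcd_aux (p : Int) (nb : List (List Int)) (mr mc : Int) :
    ∀ (l : List (Int × Int)) (acc : Bool × List (Int × Int)),
    (l.foldl (fun acc d =>
        if ¬ on_grid mr mc d.1 d.2 then acc
        else if pvCell nb (mr + d.1) (mc + d.2) = pvO p then
          (if pvWalkA nb p (pvO p) d.1 d.2 16 (mr + d.1) (mc + d.2) then
            (true, acc.2 ++ [d])
          else acc)
        else acc) acc).2
      = acc.2 ++ l.filter (fun d => on_grid mr mc d.1 d.2 &&
          (pvCell nb (mr + d.1) (mc + d.2) == pvO p) &&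
          pvWalkA nb p (pvO p) d.1 d.2 16 (mr + d.1) (mc + d.2)) := by
  intro l
  induction l with
  | nil => intro acc; simp
  | cons d l ih =>
    intro acc
    rw [List.foldl_cons, List.filter_cons]
    by_cases h1 : on_grid mr mc d.1 d.2
    · by_cases h2 : pvCell nb (mr + d.1) (mc + d.2) = pvO p
      · by_cases h3 : pvWalkA nb p (pvO p) d.1 d.2 16 (mr + d.1) (mc + d.2)
        · rw [if_neg (by simp [h1]), if_pos h2, if_pos h3, ih]
          simp [h1, h2, h3]
        · rw [if_neg (by simp [h1]), if_pos h2, if_neg h3, ih]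
          simp only [Bool.not_eq_true] at h3
          simp [h1, h2, h3]
      · rw [if_neg (by simp [h1]), if_neg h2, ih]
        simp [h1, h2]
    · simp only [Bool.not_eq_true] at h1
      rw [if_pos (by simp [h1]), ih]
      simp [h1]

theorem pv_gcd_snd (p : Int) (nb : List (List Int)) (mr mc : Int) :
    (get_capture_details p nb mr mc).2 =
      pvDIRECTIONS.filter (fun d => on_grid mr mc d.1 d.2 &&
        (pvCell nb (mr + d.1) (mc + d.2) == pvO p) &&
        pvWalkA nb p (pvO p) d.1 d.2 16 (mr + d.1) (mc + d.2)) := by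
  have h := pv_gcd_aux p nb mr mc pvDIRECTIONS (false, [])
  exact h

-- A's per-direction condition is B's "non-empty run closed by a friendly piece"
theorem pvCA_iff_BC (p : Int) (nb : List (List Int)) (mr mc : Int) {d : Int × Int}
    (hd : d ∈ pvDIRECTIONS) :
    ((on_grid mr mc d.1 d.2 &&
      (pvCell nb (mr + d.1) (mc + d.2) == pvO p) &&
      pvWalkA nb p (pvO p) d.1 d.2 16 (mr + d.1) (mc + d.2)) = true)
    ↔ pvBC p nb mr mc d := by
  have hdir := pvDir_spec hd
  have hop := pvO_ne p
  have hro : pvRunOf p nb mr mc d = pvRunB nb (pvO p) d.1 d.2 16 [] (mr + d.1) (mc + d.2) := rfl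
  by_cases hg : pvInb (mr + d.1) (mc + d.2)
  · have hgrid : on_grid mr mc d.1 d.2 = true := (pvOn_grid_iff mr mc d.1 d.2).mpr hg
    by_cases hcell : pvCell nb (mr + d.1) (mc + d.2) = pvO p
    · have hw := pvWalkA_eq nb p (pvO p) d.1 d.2 hop hdir 16 (mr + d.1) (mc + d.2)
        hg (by have := pvMu_le d.1 d.2 (mr + d.1) (mc + d.2) hg; omega)
      rw [← hro] at hw
      have hne : (pvRunOf p nb mr mc d).1 ≠ [] := by
        rw [hro, pvRunB_succ, if_pos ((pvRunB_cond_iff nb (pvO p) _ _).mpr ⟨hg, hcell⟩), pvRunB_acc]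
        simp
      constructor
      · intro hA
        simp only [hgrid, hcell, Bool.true_and, beq_self_eq_true] at hA
        obtain ⟨hsin, hscell⟩ := hw.mp hA
        exact ⟨hne, hsin.1, hsin.2.1, hsin.2.2.1, hsin.2.2.2, hscell⟩
      · intro hB
        obtain ⟨_, i1, i2, i3, i4, hscell⟩ := hB
        simp only [hgrid, hcell, Bool.true_and, beq_self_eq_true]
        exact hw.mpr ⟨⟨i1, i2, i3, i4⟩, hscell⟩
    · have hA : (on_grid mr mc d.1 d.2 &&
          (pvCell nb (mr + d.1) (mc + d.2) == pvO p) &&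
          pvWalkA nb p (pvO p) d.1 d.2 16 (mr + d.1) (mc + d.2)) = false := by
        simp [hcell]
      rw [hA]
      have hrn : (pvRunOf p nb mr mc d).1 = [] := by
        rw [hro, pvRunB_stop nb (pvO p) d.1 d.2 16 [] _ _ (by tauto)]
      simp [pvBC, hrn]
  · have hgrid : on_grid mr mc d.1 d.2 = false := by
      rcases Bool.eq_false_or_eq_true (on_grid mr mc d.1 d.2) with h | h
      · exact absurd ((pvOn_grid_iff mr mc d.1 d.2).mp h) hg
      · exact h
    have hrn : (pvRunOf p nb mr mc d).1 = [] := by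
      rw [hro, pvRunB_stop nb (pvO p) d.1 d.2 16 [] _ _ (by tauto)]
    simp [hgrid, pvBC, hrn]

-- two different direction rays from the same move never meet
theorem pvRay_disj (mr mc : Int) {d e : Int × Int} (hd : d ∈ pvDIRECTIONS) (he : e ∈ pvDIRECTIONS)
    (hne : d ≠ e) (k j : Nat) :
    (mr + d.1 + (k:Int)*d.1, mc + d.2 + (k:Int)*d.2) ≠ (mr + e.1 + (j:Int)*e.1, mc + e.2 + (j:Int)*e.2) := by
  fin_cases hd <;> fin_cases he <;> simp_all [Prod.ext_iff] <;> omega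
-- ---- A's capture loop flips exactly the closed runs, direction by direction ----
theorem pvA_fold (p : Int) (nb : List (List Int)) (mr mc : Int) :
    ∀ (l : List (Int × Int)), l.Nodup → (∀ d ∈ l, d ∈ pvDIRECTIONS) →
    ∀ (bb : List (List Int)),
    (∀ d ∈ l, ∀ k : Nat, pvInb (mr + d.1 + (k:Int)*d.1) (mc + d.2 + (k:Int)*d.2) →
      pvCell bb (mr + d.1 + (k:Int)*d.1) (mc + d.2 + (k:Int)*d.2)
        = pvCell nb (mr + d.1 + (k:Int)*d.1) (mc + d.2 + (k:Int)*d.2)) →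
    (l.filter (fun d => on_grid mr mc d.1 d.2 &&
        (pvCell nb (mr + d.1) (mc + d.2) == pvO p) &&
        pvWalkA nb p (pvO p) d.1 d.2 16 (mr + d.1) (mc + d.2))).foldl
      (fun b d => pvFlipA p (pvO p) d.1 d.2 16 b (mr + d.1) (mc + d.2)) bb
      = pvSetAll p bb (l.flatMap (pvFlipsOf p nb mr mc)) := by
  intro l
  induction l with
  | nil => intro _ _ bb _; simp [pvSetAll_nil]
  | cons d l ih =>
    intro hnd hsub bb hag
    have hd : d ∈ pvDIRECTIONS := hsub d (by simp)
    have hdir := pvDir_spec hd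
    rw [List.filter_cons, List.flatMap_cons]
    have hmemF : ∀ q ∈ pvFlipsOf p nb mr mc d, pvInb q.1 q.2 ∧
        ∃ k : Nat, q.1 = mr + d.1 + (k:Int)*d.1 ∧ q.2 = mc + d.2 + (k:Int)*d.2 := by
      intro q hq
      unfold pvFlipsOf at hq
      split_ifs at hq with hif
      · have := pvRunB_mem nb (pvO p) d.1 d.2 16 (mr + d.1) (mc + d.2) q hq
        exact ⟨this.1, this.2.2⟩
      · simp at hq
    have hagstep : ∀ e ∈ l, ∀ k : Nat,
        pvInb (mr + e.1 + (k:Int)*e.1) (mc + e.2 + (k:Int)*e.2) →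
        pvCell (pvSetAll p bb (pvFlipsOf p nb mr mc d)) (mr + e.1 + (k:Int)*e.1) (mc + e.2 + (k:Int)*e.2)
          = pvCell nb (mr + e.1 + (k:Int)*e.1) (mc + e.2 + (k:Int)*e.2) := by
      intro e he k hk
      have hde : d ≠ e := fun hde => (List.nodup_cons.mp hnd).1 (hde ▸ he)
      have hnot : (mr + e.1 + (k:Int)*e.1, mc + e.2 + (k:Int)*e.2) ∉ pvFlipsOf p nb mr mc d := by
        intro hq
        obtain ⟨_, k', e1, e2⟩ := hmemF _ hq
        exact pvRay_disj mr mc hd (hsub e (by simp [he])) hde k' k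
          (by rw [Prod.ext_iff]; exact ⟨e1.symm, e2.symm⟩)
      rw [pvCell_setAll_not_mem p (pvFlipsOf p nb mr mc d) bb _ _
            (fun q hq => ⟨(hmemF q hq).1.1, (hmemF q hq).1.2.2.1⟩) hk.1 hk.2.2.1 hnot]
      exact hag e (by simp [he]) k hk
    by_cases hBC : pvBC p nb mr mc d
    · have hCA := (pvCA_iff_BC p nb mr mc hd).mpr hBC
      rw [if_pos hCA, List.foldl_cons]
      obtain ⟨hne, i1, i2, i3, i4, hpstop⟩ := hBC
      have hgn : pvInb (mr + d.1) (mc + d.2) := by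
        by_contra hgn
        exact hne (by
          unfold pvRunOf
          rw [pvRunB_stop nb (pvO p) d.1 d.2 16 [] _ _ (by tauto)])
      have hflip : pvFlipA p (pvO p) d.1 d.2 16 bb (mr + d.1) (mc + d.2)
          = pvSetAll p bb (pvRunOf p nb mr mc d).1 :=
        pvFlipA_eq nb p (pvO p) d.1 d.2 (pvO_ne p) hdir 16 (mr + d.1) (mc + d.2) bb
          (hag d (by simp))
          (by have := pvMu_le d.1 d.2 (mr + d.1) (mc + d.2) hgn; omega)
          ⟨i1, i2, i3, i4⟩ hpstop
      rw [hflip, ← pvFlipsOf_pos ⟨hne, i1, i2, i3, i4, hpstop⟩,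
          ih (List.nodup_cons.mp hnd).2 (fun e he => hsub e (by simp [he])) _ hagstep,
          pvSetAll_append]
    · have hCAf : ¬ ((on_grid mr mc d.1 d.2 &&
          (pvCell nb (mr + d.1) (mc + d.2) == pvO p) &&
          pvWalkA nb p (pvO p) d.1 d.2 16 (mr + d.1) (mc + d.2)) = true) :=
        fun h => hBC ((pvCA_iff_BC p nb mr mc hd).mp h)
      rw [if_neg hCAf, pvFlipsOf_neg hBC, List.nil_append]
      exact ih (List.nodup_cons.mp hnd).2 (fun e he => hsub e (by simp [he])) bb
        (fun e he => hag e (by simp [he]))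

-- ---- B's single pass flips exactly the same runs ----
theorem pvB_fold (p : Int) (nb : List (List Int)) (mr mc : Int) :
    ∀ (l : List (Int × Int)), l.Nodup → (∀ d ∈ l, d ∈ pvDIRECTIONS) →
    ∀ (bb : List (List Int)),
    (∀ d ∈ l, ∀ k : Nat, pvInb (mr + d.1 + (k:Int)*d.1) (mc + d.2 + (k:Int)*d.2) →
      pvCell bb (mr + d.1 + (k:Int)*d.1) (mc + d.2 + (k:Int)*d.2)
        = pvCell nb (mr + d.1 + (k:Int)*d.1) (mc + d.2 + (k:Int)*d.2)) →
    l.foldl (fun b d =>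
        if (pvRunB b (pvO p) d.1 d.2 16 [] (mr + d.1) (mc + d.2)).1 ≠ [] ∧
            0 ≤ (pvRunB b (pvO p) d.1 d.2 16 [] (mr + d.1) (mc + d.2)).2.1 ∧
            (pvRunB b (pvO p) d.1 d.2 16 [] (mr + d.1) (mc + d.2)).2.1 < 8 ∧
            0 ≤ (pvRunB b (pvO p) d.1 d.2 16 [] (mr + d.1) (mc + d.2)).2.2 ∧
            (pvRunB b (pvO p) d.1 d.2 16 [] (mr + d.1) (mc + d.2)).2.2 < 8 ∧
            pvCell b (pvRunB b (pvO p) d.1 d.2 16 [] (mr + d.1) (mc + d.2)).2.1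
              (pvRunB b (pvO p) d.1 d.2 16 [] (mr + d.1) (mc + d.2)).2.2 = p then
          ((pvRunB b (pvO p) d.1 d.2 16 [] (mr + d.1) (mc + d.2)).1).foldl
            (fun bb q => pvSet bb q.1 q.2 p) b
        else b) bb
      = pvSetAll p bb (l.flatMap (pvFlipsOf p nb mr mc)) := by
  intro l
  induction l with
  | nil => intro _ _ bb _; simp [pvSetAll_nil]
  | cons d l ih =>
    intro hnd hsub bb hag
    have hd : d ∈ pvDIRECTIONS := hsub d (by simp)
    have hdir := pvDir_spec hd
    rw [List.foldl_cons, List.flatMap_cons]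
    have hagd : ∀ k : Nat, pvInb ((mr + d.1) + (k:Int)*d.1) ((mc + d.2) + (k:Int)*d.2) →
        pvCell bb ((mr + d.1) + (k:Int)*d.1) ((mc + d.2) + (k:Int)*d.2)
          = pvCell nb ((mr + d.1) + (k:Int)*d.1) ((mc + d.2) + (k:Int)*d.2) :=
      fun k hk => hag d (by simp) k hk
    have hrun_eq : pvRunB bb (pvO p) d.1 d.2 16 [] (mr + d.1) (mc + d.2)
        = pvRunB nb (pvO p) d.1 d.2 16 [] (mr + d.1) (mc + d.2) :=
      pvRunB_congr bb nb (pvO p) d.1 d.2 16 (mr + d.1) (mc + d.2) hagd []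
    have hro : pvRunOf p nb mr mc d = pvRunB nb (pvO p) d.1 d.2 16 [] (mr + d.1) (mc + d.2) := rfl
    have hstopcell : pvInb (pvRunOf p nb mr mc d).2.1 (pvRunOf p nb mr mc d).2.2 →
        pvCell bb (pvRunOf p nb mr mc d).2.1 (pvRunOf p nb mr mc d).2.2
          = pvCell nb (pvRunOf p nb mr mc d).2.1 (pvRunOf p nb mr mc d).2.2 := by
      intro hsin
      obtain ⟨k, hk1, hk2⟩ := pvRunB_stop_ray nb (pvO p) d.1 d.2 16 (mr + d.1) (mc + d.2)
      rw [hro] at hsin ⊢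
      rw [hk1, hk2] at hsin ⊢
      exact hagd k hsin
    have hmemF : ∀ q ∈ pvFlipsOf p nb mr mc d, pvInb q.1 q.2 ∧
        ∃ k : Nat, q.1 = mr + d.1 + (k:Int)*d.1 ∧ q.2 = mc + d.2 + (k:Int)*d.2 := by
      intro q hq
      unfold pvFlipsOf at hq
      split_ifs at hq with hif
      · have := pvRunB_mem nb (pvO p) d.1 d.2 16 (mr + d.1) (mc + d.2) q hq
        exact ⟨this.1, this.2.2⟩
      · simp at hq
    have hagstep : ∀ e ∈ l, ∀ k : Nat,
        pvInb (mr + e.1 + (k:Int)*e.1) (mc + e.2 + (k:Int)*e.2) →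
        pvCell (pvSetAll p bb (pvFlipsOf p nb mr mc d)) (mr + e.1 + (k:Int)*e.1) (mc + e.2 + (k:Int)*e.2)
          = pvCell nb (mr + e.1 + (k:Int)*e.1) (mc + e.2 + (k:Int)*e.2) := by
      intro e he k hk
      have hde : d ≠ e := fun hde => (List.nodup_cons.mp hnd).1 (hde ▸ he)
      have hnot : (mr + e.1 + (k:Int)*e.1, mc + e.2 + (k:Int)*e.2) ∉ pvFlipsOf p nb mr mc d := by
        intro hq
        obtain ⟨_, k', e1, e2⟩ := hmemF _ hq
        exact pvRay_disj mr mc hd (hsub e (by simp [he])) hde k' k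
          (by rw [Prod.ext_iff]; exact ⟨e1.symm, e2.symm⟩)
      rw [pvCell_setAll_not_mem p (pvFlipsOf p nb mr mc d) bb _ _
            (fun q hq => ⟨(hmemF q hq).1.1, (hmemF q hq).1.2.2.1⟩) hk.1 hk.2.2.1 hnot]
      exact hag e (by simp [he]) k hk
    by_cases hBC : pvBC p nb mr mc d
    · obtain ⟨hne, i1, i2, i3, i4, hpstop⟩ := hBC
      rw [hrun_eq, ← hro]
      rw [if_pos ⟨hne, i1, i2, i3, i4, by rw [hstopcell ⟨i1, i2, i3, i4⟩]; exact hpstop⟩]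
      rw [show ((pvRunOf p nb mr mc d).1.foldl (fun bb q => pvSet bb q.1 q.2 p) bb)
            = pvSetAll p bb (pvRunOf p nb mr mc d).1 from rfl,
          ← pvFlipsOf_pos ⟨hne, i1, i2, i3, i4, hpstop⟩,
          ih (List.nodup_cons.mp hnd).2 (fun e he => hsub e (by simp [he])) _ hagstep,
          pvSetAll_append]
    · rw [hrun_eq, ← hro]
      rw [if_neg (fun hcond => hBC ⟨hcond.1, hcond.2.1, hcond.2.2.1, hcond.2.2.2.1, hcond.2.2.2.2.1,
            by rw [← hstopcell ⟨hcond.2.1, hcond.2.2.1, hcond.2.2.2.1, hcond.2.2.2.2.1⟩];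
               exact hcond.2.2.2.2.2⟩)]
      rw [pvFlipsOf_neg hBC, List.nil_append]
      exact ih (List.nodup_cons.mp hnd).2 (fun e he => hsub e (by simp [he])) bb
        (fun e he => hag e (by simp [he]))
-- ---- the two programs agree wherever the Python A returns ----
theorem pv_main (p : Int) (b : List (List Int)) (mr mc : Int) :
    play_move p b (mr, mc) = play_move_alt p b (mr, mc) := by
  have hnodup : pvDIRECTIONS.Nodup := by decide
  have hagree : ∀ d ∈ pvDIRECTIONS, ∀ k : Nat,
      pvInb (mr + d.1 + (k:Int)*d.1) (mc + d.2 + (k:Int)*d.2) →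
      pvCell (pvSet b mr mc p) (mr + d.1 + (k:Int)*d.1) (mc + d.2 + (k:Int)*d.2)
        = pvCell (pvSet b mr mc p) (mr + d.1 + (k:Int)*d.1) (mc + d.2 + (k:Int)*d.2) :=
    fun _ _ _ _ => rfl
  have hA : play_move p b (mr, mc)
      = pvSetAll p (pvSet b mr mc p)
          (pvDIRECTIONS.flatMap (pvFlipsOf p (pvSet b mr mc p) mr mc)) := by
    show ((get_capture_details p (pvSet b mr mc p) mr mc).2).foldl
        (fun bb d => pvFlipA p (pvO p) d.1 d.2 16 bb (mr + d.1) (mc + d.2))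
        (pvSet b mr mc p) = _
    rw [pv_gcd_snd]
    exact pvA_fold p (pvSet b mr mc p) mr mc pvDIRECTIONS hnodup (fun d hd => hd)
      (pvSet b mr mc p) hagree
  have hB : play_move_alt p b (mr, mc)
      = pvSetAll p (pvSet b mr mc p)
          (pvDIRECTIONS.flatMap (pvFlipsOf p (pvSet b mr mc p) mr mc)) := by
    show pvDIRECTIONS.foldl (fun bb d =>
        if (pvRunB bb (pvO p) d.1 d.2 16 [] (mr + d.1) (mc + d.2)).1 ≠ [] ∧
            0 ≤ (pvRunB bb (pvO p) d.1 d.2 16 [] (mr + d.1) (mc + d.2)).2.1 ∧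
            (pvRunB bb (pvO p) d.1 d.2 16 [] (mr + d.1) (mc + d.2)).2.1 < 8 ∧
            0 ≤ (pvRunB bb (pvO p) d.1 d.2 16 [] (mr + d.1) (mc + d.2)).2.2 ∧
            (pvRunB bb (pvO p) d.1 d.2 16 [] (mr + d.1) (mc + d.2)).2.2 < 8 ∧
            pvCell bb (pvRunB bb (pvO p) d.1 d.2 16 [] (mr + d.1) (mc + d.2)).2.1
              (pvRunB bb (pvO p) d.1 d.2 16 [] (mr + d.1) (mc + d.2)).2.2 = p then
          ((pvRunB bb (pvO p) d.1 d.2 16 [] (mr + d.1) (mc + d.2)).1).foldl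
            (fun b2 q => pvSet b2 q.1 q.2 p) bb
        else bb) (pvSet b mr mc p) = _
    exact pvB_fold p (pvSet b mr mc p) mr mc pvDIRECTIONS hnodup (fun d hd => hd)
      (pvSet b mr mc p) hagree
  rw [hA, hB]

-- ===== VERDICT (by name: the statement is the Claim_ definition above) =====
theorem play_move_spec : Claim_equal_play_move := by
  intro cur_player board move _ _
  obtain ⟨mr, mc⟩ := move
  exact pv_main cur_player board mr mc
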